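-- pv_equiv track=rewrite | github.com/DireHalflings/RotatingChessboard_python3 | rotatingChessBoard.py | addEmptySpaces
-- ===== SOURCE A (Python) =====
-- def addEmptySpaces (row):
--     addedRow = ""
--     emptySpaceCount = 0
--
--     for square in row:
--         if square.isalpha():
--             if emptySpaceCount != 0:
--                 addedRow += str(emptySpaceCount)
--                 emptySpaceCount = 0
--             addedRow += square
--
--         if not square.isalpha():
--             emptySpaceCount += 1
--
--     if not row[-1].isalpha():
--         addedRow += str(emptySpaceCount)
--
--     return addedRow
-- ===== SOURCE B (Python) =====
-- def addEmptySpaces(row):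
--     parts = []
--     i, n = 0, len(row)
--     while i < n:
--         j = i + 1
--         if row[i].isalpha():
--             while j < n and row[j].isalpha():
--                 j += 1
--             parts.append(row[i:j])
--         else:
--             while j < n and not row[j].isalpha():
--                 j += 1
--             parts.append(str(j - i))
--         i = j
--     return "".join(parts)
-- ===== Notes on version B (the rewrite author's own statement) =====
-- stated objective: alternative
-- what changed: B scans maximal runs of alpha/non-alpha squares with an index scanner and joins run strings / run-length counts, instead of A's per-character fold with a pending-count accumulator and a row[-1] post-fixup.
-- outside the precondition, e.g. on addEmptySpaces(''): A raises IndexError, B returns ''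
import Mathlib
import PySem

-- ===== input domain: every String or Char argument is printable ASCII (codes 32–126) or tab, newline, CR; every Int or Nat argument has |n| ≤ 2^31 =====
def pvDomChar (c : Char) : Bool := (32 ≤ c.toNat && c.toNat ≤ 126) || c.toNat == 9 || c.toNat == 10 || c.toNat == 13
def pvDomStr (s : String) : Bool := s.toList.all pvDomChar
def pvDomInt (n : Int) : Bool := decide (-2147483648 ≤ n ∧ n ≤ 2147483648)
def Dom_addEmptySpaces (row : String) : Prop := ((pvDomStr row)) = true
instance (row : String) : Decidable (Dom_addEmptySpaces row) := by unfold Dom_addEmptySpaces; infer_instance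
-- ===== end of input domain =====

-- B replaces A's per-character fold (pending empty-square counter + row[-1] post-fixup) by a
-- maximal-run scanner that emits each alpha run verbatim and each non-alpha run as its length.

-- ===== PORT A =====
-- one loop iteration of A: state = (addedRow, emptySpaceCount)
def stepA (st : List Char × Int) (square : Char) : List Char × Int :=
  let st1 :=
    if PySem.Chars.isalpha square then
      (if st.2 != 0 then st.1 ++ PySem.Int.toChars st.2 ++ [square] else st.1 ++ [square], 0)
    else st
  if !(PySem.Chars.isalpha square) then (st1.1, st1.2 + 1) else st1

def addEmptySpaces (row : String) : String :=
  let st := row.toList.foldl stepA ([], 0)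
  -- `row[-1]` : IndexError (none) on the empty row, excluded by Pre_
  match PySem.List.pyGet? row.toList (-1) with
  | some c => if !(PySem.Chars.isalpha c) then String.mk (st.1 ++ PySem.Int.toChars st.2) else String.mk st.1
  | none => String.mk st.1

-- ===== PORT B =====
-- Source B's outer while loop: each step consumes one maximal run (the inner while loops = takeWhile/dropWhile)
def altGo : List Char → List Char
  | [] => []
  | c :: cs =>
    if PySem.Chars.isalpha c then
      (c :: cs.takeWhile (fun x => PySem.Chars.isalpha x)) ++
        altGo (cs.dropWhile (fun x => PySem.Chars.isalpha x))
    else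
      PySem.Int.toChars (((cs.takeWhile (fun x => !PySem.Chars.isalpha x)).length : Int) + 1) ++
        altGo (cs.dropWhile (fun x => !PySem.Chars.isalpha x))
termination_by l => l.length
decreasing_by
  · exact Nat.lt_succ_of_le (List.length_dropWhile_le _ _)
  · exact Nat.lt_succ_of_le (List.length_dropWhile_le _ _)

def addEmptySpaces_alt (row : String) : String := String.mk (altGo row.toList)

-- ===== PRECONDITION & SPEC =====
-- Pre_ excludes only the empty row, on which A raises IndexError (row[-1]).
def Pre_addEmptySpaces (row : String) : Prop := row ≠ ""
instance (row : String) : Decidable (Pre_addEmptySpaces row) := by unfold Pre_addEmptySpaces; infer_instance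
def pvWitness_addEmptySpaces : String := "rn2 b."

def Spec_addEmptySpaces (row : String) (out : String) : Prop := out = addEmptySpaces_alt row
instance (row : String) (out : String) : Decidable (Spec_addEmptySpaces row out) := by unfold Spec_addEmptySpaces; infer_instance

-- ===== CLAIM (what is proved, stated in full; the proofs are below) =====
def Claim_equal_addEmptySpaces : Prop := ∀ (row : String), Dom_addEmptySpaces row → Pre_addEmptySpaces row → Spec_addEmptySpaces row (addEmptySpaces row)

-- ===== LEMMAS AND PROOFS =====

-- pending count rendered at the start of an alpha run / at the end of the row
def pendA (cnt : Int) : List Char := if cnt != 0 then PySem.Int.toChars cnt else []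

-- A's "end of loop" fix-up keyed on the last square
def finishA (st : List Char × Int) (l : List Char) : List Char :=
  match l.getLast? with
  | some c => if !(PySem.Chars.isalpha c) then st.1 ++ PySem.Int.toChars st.2 else st.1
  | none => st.1

theorem stepA_alpha (acc : List Char) (cnt : Int) (c : Char)
    (hc : PySem.Chars.isalpha c = true) :
    stepA (acc, cnt) c = (acc ++ pendA cnt ++ [c], 0) := by
  simp [stepA, hc, pendA]; split <;> simp

theorem stepA_nonalpha (acc : List Char) (cnt : Int) (c : Char)
    (hc : PySem.Chars.isalpha c = false) :
    stepA (acc, cnt) c = (acc, cnt + 1) := by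
  simp [stepA, hc]

theorem foldl_stepA_alpha (r : List Char) : ∀ (c : Char),
    PySem.Chars.isalpha c = true → (∀ x ∈ r, PySem.Chars.isalpha x = true) →
    ∀ acc cnt, (c :: r).foldl stepA (acc, cnt) = (acc ++ pendA cnt ++ c :: r, 0) := by
  induction r with
  | nil => intro c hc _ acc cnt; simp only [List.foldl_cons, List.foldl_nil, stepA_alpha acc cnt c hc]
  | cons d r ih =>
    intro c hc hr acc cnt
    have hd : PySem.Chars.isalpha d = true := hr d (by simp)
    have key := ih d hd (fun x hx => hr x (by simp [hx])) (acc ++ pendA cnt ++ [c]) 0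
    rw [List.foldl_cons, stepA_alpha acc cnt c hc, key]
    simp [pendA]

theorem foldl_stepA_nonalpha (r : List Char)
    (hr : ∀ x ∈ r, PySem.Chars.isalpha x = false) :
    ∀ acc cnt, r.foldl stepA (acc, cnt) = (acc, cnt + r.length) := by
  induction r with
  | nil => intro acc cnt; simp
  | cons d r ih =>
    intro acc cnt
    have hd : PySem.Chars.isalpha d = false := hr d (by simp)
    rw [List.foldl_cons, stepA_nonalpha acc cnt d hd,
      ih (fun x hx => hr x (by simp [hx])) acc (cnt + 1), Prod.mk.injEq]
    refine ⟨rfl, by simp only [List.length_cons]; push_cast; omega⟩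

theorem mainA (n : Nat) : ∀ (c : Char) (cs : List Char), (c :: cs).length ≤ n →
    ∀ (acc : List Char) (cnt : Int),
    (cnt ≠ 0 → PySem.Chars.isalpha c = true) →
    finishA ((c :: cs).foldl stepA (acc, cnt)) (c :: cs) = acc ++ pendA cnt ++ altGo (c :: cs) := by
  induction n with
  | zero => intro c cs hl; simp at hl
  | succ n ih =>
    intro c cs hl acc cnt hcnt
    by_cases hc : PySem.Chars.isalpha c = true
    · -- alpha run
      have hsplit : cs = cs.takeWhile (fun x => PySem.Chars.isalpha x) ++
          cs.dropWhile (fun x => PySem.Chars.isalpha x) := (List.takeWhile_append_dropWhile).symm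
      have hallr : ∀ x ∈ cs.takeWhile (fun x => PySem.Chars.isalpha x),
          PySem.Chars.isalpha x = true := fun x hx => by
        simpa using List.mem_takeWhile_imp hx
      have haltgo : altGo (c :: cs) = (c :: cs.takeWhile (fun x => PySem.Chars.isalpha x)) ++
          altGo (cs.dropWhile (fun x => PySem.Chars.isalpha x)) := by
        rw [altGo]; simp [hc]
      cases hrest : cs.dropWhile (fun x => PySem.Chars.isalpha x) with
      | nil =>
        have hcr : cs = cs.takeWhile (fun x => PySem.Chars.isalpha x) := by
          conv_lhs => rw [hsplit, hrest]
          simp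
        have hall : ∀ x ∈ c :: cs, PySem.Chars.isalpha x = true := by
          intro x hx
          rcases List.mem_cons.mp hx with h | h
          · subst h; exact hc
          · exact hallr x (hcr ▸ h)
        obtain ⟨d, hd⟩ := Option.isSome_iff_exists.mp ((List.getLast?_isSome (l := c :: cs)).mpr (by simp))
        have hda : PySem.Chars.isalpha d = true := hall d (List.mem_of_getLast? hd)
        rw [show (c :: cs).foldl stepA (acc, cnt) = (acc ++ pendA cnt ++ c :: cs, 0) by
          conv_lhs => rw [hcr]
          rw [foldl_stepA_alpha _ c hc hallr acc cnt, ← hcr]]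
        unfold finishA
        rw [hd]
        simp only [hda, Bool.not_true, Bool.false_eq_true, if_false]
        rw [haltgo, hrest, altGo]
        simpa using hcr
      | cons d ds =>
        have hd : PySem.Chars.isalpha d = false := by
          have := List.head?_dropWhile_not (fun x => PySem.Chars.isalpha x) cs
          rw [hrest] at this
          simpa using this
        have hlen : (d :: ds).length ≤ n := by
          have h1 := List.length_dropWhile_le (fun x => PySem.Chars.isalpha x) cs
          rw [hrest] at h1
          simp at hl h1 ⊢; omega
        have hfold : (c :: cs).foldl stepA (acc, cnt)
            = (d :: ds).foldl stepA (acc ++ pendA cnt ++ c :: cs.takeWhile (fun x => PySem.Chars.isalpha x), 0) := by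
          conv_lhs => rw [show c :: cs = (c :: cs.takeWhile (fun x => PySem.Chars.isalpha x)) ++ d :: ds from by
            rw [List.cons_append]; rw [← hrest, ← hsplit]]
          rw [List.foldl_append, foldl_stepA_alpha _ c hc hallr acc cnt]
        have hlast : (c :: cs).getLast? = (d :: ds).getLast? := by
          conv_lhs => rw [show c :: cs = (c :: cs.takeWhile (fun x => PySem.Chars.isalpha x)) ++ d :: ds from by
            rw [List.cons_append]; rw [← hrest, ← hsplit]]
          exact List.getLast?_append_cons _ d ds
        unfold finishA
        rw [hlast, hfold]
        have := ih d ds hlen (acc ++ pendA cnt ++ c :: cs.takeWhile (fun x => PySem.Chars.isalpha x)) 0 (by simp)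
        unfold finishA at this
        rw [this, haltgo, hrest]
        simp [pendA]
    · -- non-alpha run
      have hc' : PySem.Chars.isalpha c = false := by simpa using hc
      have hcnt0 : cnt = 0 := by by_contra h; exact hc (hcnt h)
      subst hcnt0
      have hsplit : cs = cs.takeWhile (fun x => !PySem.Chars.isalpha x) ++
          cs.dropWhile (fun x => !PySem.Chars.isalpha x) := (List.takeWhile_append_dropWhile).symm
      have hallr : ∀ x ∈ c :: cs.takeWhile (fun x => !PySem.Chars.isalpha x),
          PySem.Chars.isalpha x = false := by
        intro x hx
        rcases List.mem_cons.mp hx with h | h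
        · subst h; exact hc'
        · simpa using List.mem_takeWhile_imp h
      have haltgo : altGo (c :: cs)
          = PySem.Int.toChars (((cs.takeWhile (fun x => !PySem.Chars.isalpha x)).length : Int) + 1) ++
            altGo (cs.dropWhile (fun x => !PySem.Chars.isalpha x)) := by
        rw [altGo]; simp [hc']
      have hcntval : ((0 : Int) + ((c :: cs.takeWhile (fun x => !PySem.Chars.isalpha x)).length : Int))
          = ((cs.takeWhile (fun x => !PySem.Chars.isalpha x)).length : Int) + 1 := by
        simp only [List.length_cons]; push_cast; omega
      cases hrest : cs.dropWhile (fun x => !PySem.Chars.isalpha x) with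
      | nil =>
        have hcr : cs = cs.takeWhile (fun x => !PySem.Chars.isalpha x) := by
          conv_lhs => rw [hsplit, hrest]
          simp
        obtain ⟨d, hd⟩ := Option.isSome_iff_exists.mp ((List.getLast?_isSome (l := c :: cs)).mpr (by simp))
        have hda : PySem.Chars.isalpha d = false := by
          apply hallr
          have := List.mem_of_getLast? hd
          rcases List.mem_cons.mp this with h | h
          · simp [h]
          · exact List.mem_cons.mpr (Or.inr (hcr ▸ h))
        rw [show (c :: cs).foldl stepA (acc, (0 : Int))
            = (acc, (0 : Int) + ((c :: cs.takeWhile (fun x => !PySem.Chars.isalpha x)).length : Int)) by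
          conv_lhs => rw [hcr]
          rw [foldl_stepA_nonalpha _ hallr acc 0, ← hcr]]
        unfold finishA
        rw [hd]
        simp only [hda, Bool.not_false, if_true]
        rw [haltgo, hrest, hcntval, altGo]
        simp [pendA]
      | cons d ds =>
        have hd : PySem.Chars.isalpha d = true := by
          have := List.head?_dropWhile_not (fun x => !PySem.Chars.isalpha x) cs
          rw [hrest] at this
          simpa using this
        have hlen : (d :: ds).length ≤ n := by
          have h1 := List.length_dropWhile_le (fun x => !PySem.Chars.isalpha x) cs
          rw [hrest] at h1
          simp at hl h1 ⊢; omega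
        have hfold : (c :: cs).foldl stepA (acc, (0 : Int))
            = (d :: ds).foldl stepA (acc, (0 : Int) + ((c :: cs.takeWhile (fun x => !PySem.Chars.isalpha x)).length : Int)) := by
          conv_lhs => rw [show c :: cs = (c :: cs.takeWhile (fun x => !PySem.Chars.isalpha x)) ++ d :: ds from by
            rw [List.cons_append]; rw [← hrest, ← hsplit]]
          rw [List.foldl_append, foldl_stepA_nonalpha _ hallr acc 0]
        have hlast : (c :: cs).getLast? = (d :: ds).getLast? := by
          conv_lhs => rw [show c :: cs = (c :: cs.takeWhile (fun x => !PySem.Chars.isalpha x)) ++ d :: ds from by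
            rw [List.cons_append]; rw [← hrest, ← hsplit]]
          exact List.getLast?_append_cons _ d ds
        unfold finishA
        rw [hlast, hfold]
        have := ih d ds hlen acc
          ((0 : Int) + ((c :: cs.takeWhile (fun x => !PySem.Chars.isalpha x)).length : Int))
          (fun _ => hd)
        unfold finishA at this
        rw [this, haltgo, hrest, hcntval]
        have hpend : pendA (((cs.takeWhile (fun x => !PySem.Chars.isalpha x)).length : Int) + 1)
            = PySem.Int.toChars (((cs.takeWhile (fun x => !PySem.Chars.isalpha x)).length : Int) + 1) := by
          simp only [pendA, bne_iff_ne, ne_eq]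
          rw [if_pos (by omega)]
        rw [hpend]
        simp [pendA]

-- ===== VERDICT (by name: the statement is the Claim_ definition above) =====
theorem addEmptySpaces_spec : Claim_equal_addEmptySpaces := by
  intro row _ hpre
  unfold Spec_addEmptySpaces addEmptySpaces addEmptySpaces_alt
  have hl : row.toList ≠ [] := by
    intro h
    exact hpre (String.toList_inj.mp (by simpa using h))
  rcases hl2 : row.toList with _ | ⟨c, cs⟩
  · exact absurd hl2 hl
  · have hmain := mainA (c :: cs).length c cs le_rfl [] 0 (by simp)
    simp only [pendA, List.nil_append] at hmain
    rw [if_neg (by simp)] at hmain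
    rw [PySem.List.pyGet?_neg_one]
    unfold finishA at hmain
    rcases hlast : (c :: cs).getLast? with _ | d
    · simp at hlast
    · rw [hlast] at hmain
      by_cases hda : PySem.Chars.isalpha d = true
      · simp only [hda, Bool.not_true, Bool.false_eq_true, if_false] at hmain ⊢
        rw [hmain]; simp
      · simp only [Bool.not_eq_true] at hda
        simp only [hda, Bool.not_false, if_true] at hmain ⊢
        rw [hmain]; simp
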